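-- pv_equiv track=rewrite | github.com/Platyblue/numworks-games | year3/worms.py | coords_rotation
-- ===== SOURCE A (Python) =====
-- def coords_rotation(coords, rot):
--     if rot == (0,1):
--         for i in range(len(coords)):
--             coords[i][1] = 15-coords[i][1]
--             coords[i][0] = 15 - coords[i][0]
--             coords[i][2] = -coords[i][2]
--             coords[i][3] = -coords[i][3]
--     elif rot == (-1,0):
--         for i in range(len(coords)):
--             coords[i][0], coords[i][1] = coords[i][1], 15-coords[i][0]
--             coords[i][2], coords[i][3] = coords[i][3], -coords[i][2]
--     elif rot == (1,0):
--         for i in range(len(coords)):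
--             coords[i][0], coords[i][1] = 15-coords[i][1], coords[i][0]
--             coords[i][2], coords[i][3] = -coords[i][3], coords[i][2]
--     return coords
-- ===== SOURCE B (Python) =====
-- def coords_rotation(coords, rot):
--     # Every branch of the task is a power of one primitive quarter-turn about the
--     # grid centre: Q(x,y,dx,dy) = (15-y, x, -dy, dx).  (1,0) is Q, (0,1) is Q^2,
--     # (-1,0) is Q^3; any other rot is Q^0 (no-op).  Apply Q that many times, as
--     # staged whole-list passes, mutating in place and returning the same list.
--     turns = {(1, 0): 1, (0, 1): 2, (-1, 0): 3}.get(rot, 0)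
--     for _ in range(turns):
--         for c in coords:
--             c[0], c[1], c[2], c[3] = 15 - c[1], c[0], -c[3], c[2]
--     return coords
-- ===== Notes on version B (the rewrite author's own statement) =====
-- stated objective: alternative
-- what changed: Instead of three branch-specific update formulas in one pass, B computes the quarter-turn count k for rot and applies a single primitive 90-degree rotation pass k times (180 degrees = two quarter-turns, etc.).
import Mathlib
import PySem

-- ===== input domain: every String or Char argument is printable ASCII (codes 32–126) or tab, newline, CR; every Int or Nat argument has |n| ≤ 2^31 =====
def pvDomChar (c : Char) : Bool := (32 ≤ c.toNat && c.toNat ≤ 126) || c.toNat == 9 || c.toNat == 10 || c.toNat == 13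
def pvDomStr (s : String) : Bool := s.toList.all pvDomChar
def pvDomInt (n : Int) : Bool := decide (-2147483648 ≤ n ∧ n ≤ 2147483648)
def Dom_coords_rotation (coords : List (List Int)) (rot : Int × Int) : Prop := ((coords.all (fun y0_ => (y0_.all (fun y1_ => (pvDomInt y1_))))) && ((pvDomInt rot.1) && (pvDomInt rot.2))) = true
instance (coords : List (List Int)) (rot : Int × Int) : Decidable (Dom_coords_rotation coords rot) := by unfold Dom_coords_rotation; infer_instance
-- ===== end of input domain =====

-- B replaces A's three branch-specific formulas by iterating one primitive quarter-turn
-- k times (k chosen from rot); both Pythons mutate coords in place and return it — the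
-- equivalence proved is about the returned value (the final mutation is the same).

-- ===== PORT A =====
-- each branch's per-element in-place updates, in A's statement order
def pvUpdA180 (c : List Int) : List Int :=
  let c := c.set 1 (15 - c.getD 1 0)
  let c := c.set 0 (15 - c.getD 0 0)
  let c := c.set 2 (-(c.getD 2 0))
  c.set 3 (-(c.getD 3 0))

def pvUpdAneg (c : List Int) : List Int :=
  -- coords[i][0], coords[i][1] = coords[i][1], 15-coords[i][0]  (RHS first)
  let a := c.getD 1 0
  let b := 15 - c.getD 0 0
  let c := (c.set 0 a).set 1 b
  let d := c.getD 3 0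
  let e := -(c.getD 2 0)
  (c.set 2 d).set 3 e

def pvUpdApos (c : List Int) : List Int :=
  let a := 15 - c.getD 1 0
  let b := c.getD 0 0
  let c := (c.set 0 a).set 1 b
  let d := -(c.getD 3 0)
  let e := c.getD 2 0
  (c.set 2 d).set 3 e

def coords_rotation (coords : List (List Int)) (rot : Int × Int) : List (List Int) :=
  if rot = (0, 1) then coords.map pvUpdA180
  else if rot = (-1, 0) then coords.map pvUpdAneg
  else if rot = (1, 0) then coords.map pvUpdApos
  else coords

-- ===== PORT B =====
-- one primitive 90° turn about the grid centre, tuple assignment = all RHS from old c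
def pvQuarter (c : List Int) : List Int :=
  (((c.set 0 (15 - c.getD 1 0)).set 1 (c.getD 0 0)).set 2 (-(c.getD 3 0))).set 3 (c.getD 2 0)

def pvTurnsDict : PySem.Dict (Int × Int) Int :=
  PySem.Dict.ofList [((1, 0), 1), ((0, 1), 2), ((-1, 0), 3)]

def coords_rotation_alt (coords : List (List Int)) (rot : Int × Int) : List (List Int) :=
  let turns := pvTurnsDict.getD rot 0
  (PySem.List.pyRange 0 turns 1).foldl (fun cs _ => cs.map pvQuarter) coords

-- ===== PRECONDITION & SPEC =====
-- Pre_ excludes exactly the inputs where Python A raises IndexError: a matched rot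
-- with some inner list shorter than 4.
def Pre_coords_rotation (coords : List (List Int)) (rot : Int × Int) : Prop :=
  (rot = (0, 1) ∨ rot = (-1, 0) ∨ rot = (1, 0)) → ∀ c ∈ coords, 4 ≤ c.length
instance (coords : List (List Int)) (rot : Int × Int) : Decidable (Pre_coords_rotation coords rot) := by unfold Pre_coords_rotation; infer_instance

def pvWitness_coords_rotation : List (List Int) × (Int × Int) := ([[1, 2, 3, 4], [0, 15, -1, 0]], (0, 1))

def Spec_coords_rotation (coords : List (List Int)) (rot : Int × Int) (out : List (List Int)) : Prop := out = coords_rotation_alt coords rot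
instance (coords : List (List Int)) (rot : Int × Int) (out : List (List Int)) : Decidable (Spec_coords_rotation coords rot out) := by unfold Spec_coords_rotation; infer_instance

-- ===== CLAIM (what is proved, stated in full; the proofs are below) =====
def Claim_equal_coords_rotation : Prop := ∀ (coords : List (List Int)) (rot : Int × Int), Dom_coords_rotation coords rot → Pre_coords_rotation coords rot → Spec_coords_rotation coords rot (coords_rotation coords rot)

-- ===== LEMMAS AND PROOFS =====
theorem pvWitness_ok : Dom_coords_rotation pvWitness_coords_rotation.1 pvWitness_coords_rotation.2 ∧ Pre_coords_rotation pvWitness_coords_rotation.1 pvWitness_coords_rotation.2 := by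
  constructor <;> decide

-- on lists of length ≥ 4, each of A's branch updates is the matching power of pvQuarter
theorem pvElemPos (c : List Int) (h : 4 ≤ c.length) : pvUpdApos c = pvQuarter c := by
  match c, h with
  | a :: b :: d :: e :: rest, _ => simp [pvUpdApos, pvQuarter, List.set]

theorem pvElem180 (c : List Int) (h : 4 ≤ c.length) : pvUpdA180 c = pvQuarter (pvQuarter c) := by
  match c, h with
  | a :: b :: d :: e :: rest, _ => simp [pvUpdA180, pvQuarter, List.set]

theorem pvElemNeg (c : List Int) (h : 4 ≤ c.length) :
    pvUpdAneg c = pvQuarter (pvQuarter (pvQuarter c)) := by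
  match c, h with
  | a :: b :: d :: e :: rest, _ => simp [pvUpdAneg, pvQuarter, List.set]

-- ===== VERDICT (by name: the statement is the Claim_ definition above) =====
theorem coords_rotation_spec : Claim_equal_coords_rotation := by
  intro coords rot _dom pre
  unfold Spec_coords_rotation coords_rotation coords_rotation_alt
  by_cases h1 : rot = (0, 1)
  · subst h1
    have hpre := pre (Or.inl rfl)
    have ht : pvTurnsDict.getD ((0 : Int), (1 : Int)) 0 = 2 := by decide
    have hr : PySem.List.pyRange 0 2 1 = [0, 1] := by decide
    simp only [ht, hr, List.foldl, List.map_map]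
    exact List.map_congr_left (fun c hc => (pvElem180 c (hpre c hc)))
  · by_cases h2 : rot = (-1, 0)
    · subst h2
      have hpre := pre (Or.inr (Or.inl rfl))
      rw [if_neg (by decide : ¬((-1 : Int), (0 : Int)) = (0, 1))]
      have ht : pvTurnsDict.getD ((-1 : Int), (0 : Int)) 0 = 3 := by decide
      have hr : PySem.List.pyRange 0 3 1 = [0, 1, 2] := by decide
      simp only [ht, hr, List.foldl, List.map_map]
      exact List.map_congr_left (fun c hc => (pvElemNeg c (hpre c hc)))
    · by_cases h3 : rot = (1, 0)
      · subst h3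
        have hpre := pre (Or.inr (Or.inr rfl))
        rw [if_neg (by decide : ¬((1 : Int), (0 : Int)) = (0, 1)),
          if_neg (by decide : ¬((1 : Int), (0 : Int)) = (-1, 0))]
        have ht : pvTurnsDict.getD ((1 : Int), (0 : Int)) 0 = 1 := by decide
        have hr : PySem.List.pyRange 0 1 1 = [0] := by decide
        simp only [ht, hr, List.foldl]
        exact List.map_congr_left (fun c hc => (pvElemPos c (hpre c hc)))
      · have ht : pvTurnsDict.getD rot 0 = 0 := by
          simp [pvTurnsDict, PySem.Dict.getD, PySem.Dict.ofList, PySem.Dict.update,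
            PySem.Dict.get?_insert, h1, h2, h3]
        rw [if_neg h1, if_neg h2, if_neg h3]
        simp [ht]
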